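-- pv_equiv track=rewrite | github.com/pxddubny/repo1 | IGI/LR3/Task4/task4.py | phrases_sorted_in_alphabet
-- ===== SOURCE A (Python) =====
-- def phrases_sorted_in_alphabet(str):
--     result = []
--     s = ''
--     i = 0
--     while (i < len(str)):
--         if (str[i] == ','):
--             i += 2
--             while (i < len(str)):
--                 if (str[i] == '.'or str[i] == ','):
--                     i += 1
--                     break
--                 s += str[i]
--                 i += 1
--             result.append(s)
--             s = ''
--             continue
--         i += 1
--     result.sort()
--     return result
-- ===== SOURCE B (Python) =====
-- def phrases_sorted_in_alphabet(str):
--     # single flat scan with an explicit state machine instead of nested index loops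
--     SEARCH, SKIP, COLLECT = 0, 1, 2
--     state = SEARCH
--     buf = ''
--     pending = False
--     result = []
--     for ch in str:
--         if state == SEARCH:
--             if ch == ',':
--                 state = SKIP
--                 buf = ''
--                 pending = True
--         elif state == SKIP:
--             state = COLLECT
--         else:
--             if ch == '.' or ch == ',':
--                 result.append(buf)
--                 pending = False
--                 state = SEARCH
--             else:
--                 buf += ch
--     if pending:
--         result.append(buf)
--     result.sort()
--     return result
-- ===== Notes on version B (the rewrite author's own statement) =====
-- stated objective: alternative
-- what changed: Replaces A's nested while loops with manual index arithmetic by a single flat for-loop over the characters driven by an explicit SEARCH/SKIP/COLLECT state machine with a pending-phrase flag.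
import Mathlib
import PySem

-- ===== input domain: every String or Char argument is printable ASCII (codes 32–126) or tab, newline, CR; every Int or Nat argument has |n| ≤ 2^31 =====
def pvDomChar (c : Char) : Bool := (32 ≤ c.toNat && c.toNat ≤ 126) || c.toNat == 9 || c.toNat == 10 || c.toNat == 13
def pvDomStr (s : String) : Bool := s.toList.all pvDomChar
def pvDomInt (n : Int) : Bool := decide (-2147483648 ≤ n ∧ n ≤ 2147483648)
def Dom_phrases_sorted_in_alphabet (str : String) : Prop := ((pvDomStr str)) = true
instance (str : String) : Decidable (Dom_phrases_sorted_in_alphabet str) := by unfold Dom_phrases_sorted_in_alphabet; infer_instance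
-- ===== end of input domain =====

-- B replaces A's nested while loops with index arithmetic by one flat pass over the
-- characters driven by an explicit state machine (SEARCH/SKIP/COLLECT); same values proved.

-- ===== PORT A =====
-- inner while loop of A: collect chars from index i until '.' or ',' (consumed) or end
def pvInnerA (cs : List Char) (i : Nat) (s : List Char) : List Char × Nat :=
  if h : i < cs.length then
    if cs[i] = '.' ∨ cs[i] = ',' then (s, i + 1)
    else pvInnerA cs (i + 1) (s ++ [cs[i]])
  else (s, i)
termination_by cs.length - i
decreasing_by exact Nat.sub_succ_lt_self cs.length i h

-- termination fact the outer loop cites: the inner loop never moves i backwards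
theorem pvInnerA_dec (cs : List Char) (i j : Nat) (h : i < cs.length) (hj : i + 2 ≤ j) :
    cs.length - j < cs.length - i := by omega

theorem pvInnerA_ge (cs : List Char) (i : Nat) (s : List Char) : i ≤ (pvInnerA cs i s).2 := by
  unfold pvInnerA
  split
  case isTrue h =>
    split
    · simp
    · exact le_trans (Nat.le_succ i) (pvInnerA_ge cs (i + 1) (s ++ [cs[i]]))
  case isFalse h => simp
termination_by cs.length - i

-- outer while loop of A
def pvOuterA (cs : List Char) (i : Nat) (result : List String) : List String :=
  if h : i < cs.length then
    if cs[i] = ',' then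
      let p := pvInnerA cs (i + 2) []
      pvOuterA cs p.2 (result ++ [String.mk p.1])
    else pvOuterA cs (i + 1) result
  else result
termination_by cs.length - i
decreasing_by
  · exact pvInnerA_dec cs i _ h (pvInnerA_ge cs (i + 2) [])
  · exact Nat.sub_succ_lt_self cs.length i h

def phrases_sorted_in_alphabet (str : String) : List String :=
  PySem.List.sorted (pvOuterA str.toList 0 []) (fun x => x) false

-- ===== PORT B =====
-- state: (result, buf, pending, state) with state 0 = SEARCH, 1 = SKIP, 2 = COLLECT
def pvStepB (st : List String × List Char × Bool × Nat) (ch : Char) :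
    List String × List Char × Bool × Nat :=
  let (result, buf, pending, state) := st
  if state = 0 then
    if ch = ',' then (result, [], true, 1) else (result, buf, pending, 0)
  else if state = 1 then (result, buf, pending, 2)
  else
    if ch = '.' ∨ ch = ',' then (result ++ [String.mk buf], [], false, 0)
    else (result, buf ++ [ch], pending, 2)

def pvFinishB (st : List String × List Char × Bool × Nat) : List String :=
  let (result, buf, pending, _) := st
  if pending then result ++ [String.mk buf] else result

def phrases_sorted_in_alphabet_alt (str : String) : List String :=
  PySem.List.sorted (pvFinishB (str.toList.foldl pvStepB ([], [], false, 0)))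
    (fun x => x) false

-- ===== PRECONDITION & SPEC =====
def Spec_phrases_sorted_in_alphabet (str : String) (out : List String) : Prop := out = phrases_sorted_in_alphabet_alt str
instance (str : String) (out : List String) : Decidable (Spec_phrases_sorted_in_alphabet str out) := by unfold Spec_phrases_sorted_in_alphabet; infer_instance

-- ===== CLAIM (what is proved, stated in full; the proofs are below) =====
def Claim_equal_phrases_sorted_in_alphabet : Prop := ∀ (str : String), Dom_phrases_sorted_in_alphabet str → Spec_phrases_sorted_in_alphabet str (phrases_sorted_in_alphabet str)

-- ===== LEMMAS AND PROOFS =====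

-- the two loop shapes compute the same list of phrases, related via the suffix cs.drop i
theorem pvMain (cs : List Char) (k : Nat) (i : Nat) (hk : cs.length - i ≤ k) :
    (∀ res : List String,
        pvFinishB ((cs.drop i).foldl pvStepB (res, [], false, 0)) = pvOuterA cs i res) ∧
    (∀ (res : List String) (s : List Char),
        pvFinishB ((cs.drop i).foldl pvStepB (res, s, true, 2)) =
          pvOuterA cs (pvInnerA cs i s).2 (res ++ [String.mk (pvInnerA cs i s).1])) := by
  induction k generalizing i with
  | zero =>
      have hge : cs.length ≤ i := by omega
      have hd : cs.drop i = [] := List.drop_eq_nil_of_le hge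
      constructor
      · intro res
        rw [hd]
        unfold pvOuterA
        simp [pvFinishB, Nat.not_lt.mpr hge]
      · intro res s
        rw [hd]
        unfold pvInnerA pvOuterA
        have h2 : ¬ i < cs.length := Nat.not_lt.mpr hge
        simp [pvFinishB, h2]
  | succ k ih =>
      by_cases h : i < cs.length
      · have hd : cs.drop i = cs[i] :: cs.drop (i + 1) :=
          List.drop_eq_getElem_cons h
        have hk1 : cs.length - (i + 1) ≤ k := by omega
        constructor
        · intro res
          rw [hd]
          unfold pvOuterA
          by_cases hc : cs[i] = ','
          · -- comma: enter SKIP state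
            simp only [List.foldl_cons, pvStepB, hc, if_pos, h, dif_pos]
            by_cases h1 : i + 1 < cs.length
            · have hd1 : cs.drop (i + 1) = cs[i+1] :: cs.drop (i + 2) :=
                List.drop_eq_getElem_cons h1
              rw [hd1, List.foldl_cons]
              have hstep : pvStepB (res, [], true, 1) cs[i+1] = (res, [], true, 2) := by
                simp [pvStepB]
              rw [hstep]
              have hk2 : cs.length - (i + 2) ≤ k := by omega
              exact (ih (i + 2) hk2).2 res []
            · -- string ends right after the comma: SKIP never fires, pending '' appended
              have hd1 : cs.drop (i + 1) = [] := List.drop_eq_nil_of_le (by omega)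
              rw [hd1]
              have hi2 : ¬ i + 2 < cs.length := by omega
              unfold pvInnerA
              simp only [hi2, dif_neg, not_false_iff]
              unfold pvOuterA
              simp [pvFinishB, hi2]
          · -- not a comma: stay in SEARCH
            simp only [List.foldl_cons, pvStepB, hc, h, dif_pos, if_neg, if_pos]
            exact (ih (i + 1) hk1).1 res
        · intro res s
          rw [hd]
          unfold pvInnerA
          simp only [h, dif_pos]
          by_cases ht : cs[i] = '.' ∨ cs[i] = ','
          · -- terminator: phrase done, back to SEARCH
            simp only [List.foldl_cons, pvStepB, ht, if_pos]
            have := (ih (i + 1) hk1).1 (res ++ [String.mk s])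
            simpa [pvStepB] using this
          · -- ordinary char: keep collecting
            simp only [List.foldl_cons, pvStepB, ht, if_neg, if_pos]
            have := (ih (i + 1) hk1).2 res (s ++ [cs[i]])
            simpa [pvStepB, ht] using this
      · have hge : cs.length ≤ i := Nat.le_of_not_lt h
        have hd : cs.drop i = [] := List.drop_eq_nil_of_le hge
        constructor
        · intro res
          rw [hd]
          unfold pvOuterA
          simp [pvFinishB, h]
        · intro res s
          rw [hd]
          unfold pvInnerA pvOuterA
          simp [pvFinishB, h]

-- ===== VERDICT (by name: the statement is the Claim_ definition above) =====
theorem phrases_sorted_in_alphabet_spec : Claim_equal_phrases_sorted_in_alphabet := by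
  intro str _
  unfold Spec_phrases_sorted_in_alphabet phrases_sorted_in_alphabet phrases_sorted_in_alphabet_alt
  have := (pvMain str.toList str.toList.length 0 (by omega)).1 []
  rw [List.drop_zero] at this
  rw [this]
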